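-- pv_equiv track=rewrite | github.com/Auztin/OoT-Randomizer | texture_util.py | rgba16_to_ci8
-- ===== SOURCE A (Python) =====
-- def rgba16_to_ci8(rgba16_texture: list[int]) -> tuple[list[int], list[int]]:
--     ci8_texture = []
--     palette = get_colors_from_rgba16(rgba16_texture)  # Get all the colors in the texture
--     if len(palette) > 0x100:  # Make sure there are <= 256 colors. Could probably do some fancy stuff to convert, but nah.
--         raise(Exception("RGB Texture exceeds maximum of 256 colors"))
--     if len(palette) < 0x100:  # Pad the palette with 0x0001 #Pad the palette with 0001s to take up the full 256 colors
--         for i in range(0, 0x100 - len(palette)):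
--             palette.append(0x0001)
--
--     # Create the new ci8 texture (list of bytes) by locating the index of each color from the rgba16 texture in the color palette.
--     for pixel in rgba16_texture:
--         if pixel in palette:
--             ci8_texture.append(palette.index(pixel))
--     return ci8_texture, palette
--
-- def get_colors_from_rgba16(rgba16_texture: list[int]) -> list[int]:
--     colors = []
--     for pixel in rgba16_texture:
--         if pixel not in colors:
--             colors.append(pixel)
--     return colors
-- ===== SOURCE B (Python) =====
-- def rgba16_to_ci8(rgba16_texture: list[int]) -> tuple[list[int], list[int]]:
--     # One pass: build palette and color->index map while emitting indices.
--     ci8_texture = []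
--     palette = []
--     index_of = {}
--     for pixel in rgba16_texture:
--         idx = index_of.get(pixel)
--         if idx is None:
--             idx = len(palette)
--             index_of[pixel] = idx
--             palette.append(pixel)
--         ci8_texture.append(idx)
--     if len(palette) > 0x100:
--         raise Exception("RGB Texture exceeds maximum of 256 colors")
--     palette.extend([0x0001] * (0x100 - len(palette)))
--     return ci8_texture, palette
-- ===== Notes on version B (the rewrite author's own statement) =====
-- stated objective: faster
-- what changed: Replaces the two-pass scheme (dedup pass, then per-pixel palette.index/membership scans over the 256-entry palette) with a single pass that maintains a color->index dict and emits each pixel's index as the palette is built.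
import Mathlib
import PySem

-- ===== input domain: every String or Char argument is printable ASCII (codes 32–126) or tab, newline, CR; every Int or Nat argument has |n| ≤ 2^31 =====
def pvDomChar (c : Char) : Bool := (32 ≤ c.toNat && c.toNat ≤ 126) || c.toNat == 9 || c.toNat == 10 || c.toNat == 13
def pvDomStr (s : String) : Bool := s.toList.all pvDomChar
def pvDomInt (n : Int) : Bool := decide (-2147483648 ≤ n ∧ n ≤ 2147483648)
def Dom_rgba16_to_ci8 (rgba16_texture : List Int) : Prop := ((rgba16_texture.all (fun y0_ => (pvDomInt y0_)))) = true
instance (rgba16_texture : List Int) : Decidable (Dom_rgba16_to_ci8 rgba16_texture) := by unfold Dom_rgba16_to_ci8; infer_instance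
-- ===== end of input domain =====

-- B replaces A's two passes (dedup scan, then per-pixel palette.index/membership scans) by one
-- pass with a color→index dict; objective: faster (removes the inner palette scans).


-- ===== PORT A =====
-- get_colors_from_rgba16: first-appearance dedup
def pvGetColors (rgba16_texture : List Int) : List Int :=
  rgba16_texture.foldl (fun colors pixel => if pixel ∈ colors then colors else colors ++ [pixel]) []

def rgba16_to_ci8 (rgba16_texture : List Int) : List Int × List Int :=
  let palette := pvGetColors rgba16_texture
  if palette.length > 256 then ([], [])  -- Python raises Exception here; excluded by Pre_
  else
    let palette := if palette.length < 256 then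
        (PySem.List.pyRange 0 (256 - (palette.length : Int)) 1).foldl
          (fun p _ => p ++ [(1 : Int)]) palette
      else palette
    let ci8 := rgba16_texture.foldl
      (fun acc pixel => if pixel ∈ palette then
          acc ++ [(((PySem.List.index? palette pixel).getD 0 : Nat) : Int)]
        else acc) []
    (ci8, palette)

-- ===== PORT B =====
-- one pass: state = (ci8, palette, color→index dict)
def pvStepB (st : List Int × List Int × PySem.Dict Int Int) (pixel : Int) :
    List Int × List Int × PySem.Dict Int Int :=
  match st.2.2.get? pixel with
  | some i => (st.1 ++ [i], st.2.1, st.2.2)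
  | none => (st.1 ++ [(st.2.1.length : Int)], st.2.1 ++ [pixel],
             st.2.2.insert pixel (st.2.1.length : Int))

def rgba16_to_ci8_alt (rgba16_texture : List Int) : List Int × List Int :=
  let st := rgba16_texture.foldl pvStepB ([], [], PySem.Dict.empty)
  if st.2.1.length > 256 then ([], [])  -- Python raises Exception here; excluded by Pre_
  else (st.1, st.2.1 ++ List.replicate (256 - st.2.1.length) 1)

-- ===== PRECONDITION & SPEC =====
-- Pre_ excludes exactly the textures with more than 256 distinct colors, on which A (and B) raise Exception.
def Pre_rgba16_to_ci8 (rgba16_texture : List Int) : Prop := rgba16_texture.dedup.length ≤ 256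
instance (rgba16_texture : List Int) : Decidable (Pre_rgba16_to_ci8 rgba16_texture) := by unfold Pre_rgba16_to_ci8; infer_instance
def pvWitness_rgba16_to_ci8 : List Int := [3, 1, 3, 2]

def Spec_rgba16_to_ci8 (rgba16_texture : List Int) (out : List Int × List Int) : Prop := out = rgba16_to_ci8_alt rgba16_texture
instance (rgba16_texture : List Int) (out : List Int × List Int) : Decidable (Spec_rgba16_to_ci8 rgba16_texture out) := by unfold Spec_rgba16_to_ci8; infer_instance

-- ===== CLAIM (what is proved, stated in full; the proofs are below) =====
def Claim_equal_rgba16_to_ci8 : Prop := ∀ (rgba16_texture : List Int), Dom_rgba16_to_ci8 rgba16_texture → Pre_rgba16_to_ci8 rgba16_texture → Spec_rgba16_to_ci8 rgba16_texture (rgba16_to_ci8 rgba16_texture)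

-- ===== LEMMAS AND PROOFS =====

-- dedup loop from an arbitrary accumulator
def pvDedupAcc (pal : List Int) (t : List Int) : List Int :=
  t.foldl (fun cs p => if p ∈ cs then cs else cs ++ [p]) pal

-- the per-pixel indices, computed while extending the palette
def pvMapIdx : List Int → List Int → List Int
  | _, [] => []
  | pal, p :: t => if p ∈ pal then ((pal.idxOf p : Nat) : Int) :: pvMapIdx pal t
                   else ((pal.length : Nat) : Int) :: pvMapIdx (pal ++ [p]) t

theorem pvDedupAcc_cons (pal : List Int) (p : Int) (t : List Int) :
    pvDedupAcc pal (p :: t) = pvDedupAcc (if p ∈ pal then pal else pal ++ [p]) t := by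
  simp [pvDedupAcc, List.foldl_cons]

theorem pvDedupAcc_prefix (t pal : List Int) : ∃ r, pvDedupAcc pal t = pal ++ r := by
  induction t generalizing pal with
  | nil => exact ⟨[], by simp [pvDedupAcc]⟩
  | cons p t ih =>
    rw [pvDedupAcc_cons]
    by_cases h : p ∈ pal
    · simpa [h] using ih pal
    · obtain ⟨r, hr⟩ := ih (pal ++ [p])
      exact ⟨p :: r, by simp [h, hr]⟩

theorem pvDedupAcc_mem (t pal : List Int) (x : Int) :
    x ∈ pvDedupAcc pal t ↔ x ∈ pal ∨ x ∈ t := by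
  induction t generalizing pal with
  | nil => simp [pvDedupAcc]
  | cons p t ih =>
    rw [pvDedupAcc_cons]
    by_cases h : p ∈ pal
    · rw [if_pos h, ih]
      constructor
      · rintro (hx | hx) <;> simp [hx]
      · rintro (hx | hx)
        · exact Or.inl hx
        · rcases List.mem_cons.1 hx with rfl | hx
          · exact Or.inl h
          · exact Or.inr hx
    · rw [if_neg h, ih]
      simp [List.mem_append, or_assoc]

theorem pvDedupAcc_nodup (t : List Int) : ∀ pal : List Int, pal.Nodup → (pvDedupAcc pal t).Nodup := by
  induction t with
  | nil => intro pal h; simpa [pvDedupAcc] using h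
  | cons p t ih =>
    intro pal h
    rw [pvDedupAcc_cons]
    by_cases hp : p ∈ pal
    · rw [if_pos hp]; exact ih pal h
    · rw [if_neg hp]
      refine ih _ ?_
      have hdisj : pal.Disjoint [p] := by
        intro a ha hb
        rw [List.mem_singleton] at hb
        exact hp (hb ▸ ha)
      exact h.append (List.nodup_singleton p) hdisj

-- first-occurrence index is unchanged by extending the list on the right
theorem pvIdxOf_prefix (pal r : List Int) (p : Int) (hp : p ∈ pal) :
    (pal ++ r).idxOf p = pal.idxOf p := by
  induction pal with
  | nil => cases hp
  | cons a pal ih =>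
    by_cases hap : a = p
    · subst hap; simp [List.idxOf_cons_self]
    · rcases List.mem_cons.1 hp with rfl | hp'
      · exact absurd rfl hap
      · have hbeq : (a == p) = false := by simp [hap]
        simp [List.idxOf_cons, hbeq, ih hp']

theorem pvIdxOf_append_self (pal : List Int) (p : Int) (hp : p ∉ pal) :
    (pal ++ [p]).idxOf p = pal.length := by
  induction pal with
  | nil => simp
  | cons a pal ih =>
    have hap : a ≠ p := fun h => hp (h ▸ List.mem_cons_self)
    have hbeq : (a == p) = false := by simp [hap]
    have hp' : p ∉ pal := fun h => hp (List.mem_cons_of_mem _ h)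
    simp [List.idxOf_cons, hbeq, ih hp']

-- the map over the final deduped list equals the incremental index computation
theorem pvMap_eq_mapIdx (t : List Int) : ∀ pal : List Int,
    t.map (fun p => (((pvDedupAcc pal t).idxOf p : Nat) : Int)) = pvMapIdx pal t := by
  induction t with
  | nil => intro pal; simp [pvMapIdx]
  | cons p t ih =>
    intro pal
    rw [pvDedupAcc_cons]
    by_cases hp : p ∈ pal
    · rw [if_pos hp]
      obtain ⟨r, hr⟩ := pvDedupAcc_prefix t pal
      simp only [List.map_cons, pvMapIdx, if_pos hp]
      rw [ih pal]
      congr 1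
      rw [hr, pvIdxOf_prefix pal r p hp]
    · rw [if_neg hp]
      obtain ⟨r, hr⟩ := pvDedupAcc_prefix t (pal ++ [p])
      have hmem : p ∈ pal ++ [p] := by simp
      simp only [List.map_cons, pvMapIdx, if_neg hp]
      rw [ih (pal ++ [p])]
      congr 1
      rw [hr, pvIdxOf_prefix (pal ++ [p]) r p hmem, pvIdxOf_append_self pal p hp]

-- A's index loop: the guard always holds, and index? gives the idxOf
theorem pvIndex?_eq_idxOf (pal : List Int) (p : Int) (hp : p ∈ pal) :
    PySem.List.index? pal p = some (pal.idxOf p) := by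
  induction pal with
  | nil => cases hp
  | cons a pal ih =>
    by_cases hap : a = p
    · subst hap
      rw [PySem.List.index?_cons_self]
      simp [List.idxOf_cons_self]
    · rcases List.mem_cons.1 hp with rfl | hp'
      · exact absurd rfl hap
      · have hbeq : (a == p) = false := by simp [hap]
        rw [PySem.List.index?_cons_of_ne pal hap, ih hp']
        simp [List.idxOf_cons, hbeq]

-- filtered-append fold is a map when the guard always holds
theorem pvFoldA (P : List Int) (f : Int → Int) (t : List Int) (h : ∀ p ∈ t, p ∈ P) :
    ∀ acc : List Int,
      t.foldl (fun acc pixel => if pixel ∈ P then acc ++ [f pixel] else acc) acc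
        = acc ++ t.map f := by
  induction t with
  | nil => intro acc; simp
  | cons p t ih =>
    intro acc
    have hp : p ∈ P := h p List.mem_cons_self
    simp only [List.foldl_cons, if_pos hp, List.map_cons]
    rw [ih (fun q hq => h q (List.mem_cons_of_mem _ hq))]
    simp

-- the padding loop appends replicate
theorem pvPadFold (l : List Int) : ∀ init : List Int,
    l.foldl (fun p _ => p ++ [(1 : Int)]) init = init ++ List.replicate l.length 1 := by
  induction l with
  | nil => intro init; simp
  | cons a l ih =>
    intro init
    rw [List.foldl_cons, ih]
    simp [List.replicate_succ]

-- invariant on B's dict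
def pvInv (pal : List Int) (d : PySem.Dict Int Int) : Prop :=
  ∀ c : Int, d.get? c = if c ∈ pal then some ((pal.idxOf c : Nat) : Int) else none

theorem pvFoldB (t : List Int) : ∀ (ci8 pal : List Int) (d : PySem.Dict Int Int),
    pvInv pal d →
    ∃ d', t.foldl pvStepB (ci8, pal, d) = (ci8 ++ pvMapIdx pal t, pvDedupAcc pal t, d') := by
  induction t with
  | nil => intro ci8 pal d _; exact ⟨d, by simp [pvMapIdx, pvDedupAcc]⟩
  | cons p t ih =>
    intro ci8 pal d hinv
    rw [List.foldl_cons]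
    by_cases hp : p ∈ pal
    · have hd : d.get? p = some ((pal.idxOf p : Nat) : Int) := by rw [hinv p, if_pos hp]
      have hstep : pvStepB (ci8, pal, d) p
          = (ci8 ++ [((pal.idxOf p : Nat) : Int)], pal, d) := by
        simp [pvStepB, hd]
      rw [hstep]
      obtain ⟨d', hd'⟩ := ih (ci8 ++ [((pal.idxOf p : Nat) : Int)]) pal d hinv
      refine ⟨d', ?_⟩
      rw [hd', pvDedupAcc_cons, if_pos hp]
      simp [pvMapIdx, hp]
    · have hd : d.get? p = none := by rw [hinv p, if_neg hp]
      have hstep : pvStepB (ci8, pal, d) p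
          = (ci8 ++ [((pal.length : Nat) : Int)], pal ++ [p],
             d.insert p ((pal.length : Nat) : Int)) := by
        simp [pvStepB, hd]
      rw [hstep]
      have hinv' : pvInv (pal ++ [p]) (d.insert p ((pal.length : Nat) : Int)) := by
        intro c
        by_cases hc : c = p
        · subst hc
          rw [PySem.Dict.get?_insert_self, if_pos (by simp)]
          rw [pvIdxOf_append_self pal c hp]
        · rw [PySem.Dict.get?_insert_of_ne _ _ hc, hinv c]
          by_cases hcp : c ∈ pal
          · rw [if_pos hcp, if_pos (by simp [hcp])]
            rw [pvIdxOf_prefix pal [p] c hcp]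
          · rw [if_neg hcp, if_neg (by simp [hcp, hc])]
      obtain ⟨d', hd'⟩ := ih (ci8 ++ [((pal.length : Nat) : Int)]) (pal ++ [p]) _ hinv'
      refine ⟨d', ?_⟩
      rw [hd', pvDedupAcc_cons, if_neg hp]
      simp [pvMapIdx, hp]

-- length of the dedup loop equals Mathlib's dedup length
theorem pvGetColors_length (t : List Int) : (pvGetColors t).length = t.dedup.length := by
  have hnodup : (pvGetColors t).Nodup := pvDedupAcc_nodup t [] List.nodup_nil
  have hmem : ∀ x, x ∈ pvGetColors t ↔ x ∈ t.dedup := by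
    intro x
    rw [List.mem_dedup]
    simpa using pvDedupAcc_mem t [] x
  exact ((List.perm_ext_iff_of_nodup hnodup t.nodup_dedup).2 hmem).length_eq

-- ===== VERDICT (by name: the statement is the Claim_ definition above) =====
theorem rgba16_to_ci8_spec : Claim_equal_rgba16_to_ci8 := by
  intro t _ hpre
  unfold Spec_rgba16_to_ci8 Pre_rgba16_to_ci8 at *
  have hinv0 : pvInv [] PySem.Dict.empty := fun c => by simp [PySem.Dict.get?_empty]
  obtain ⟨d', hfold⟩ := pvFoldB t [] [] PySem.Dict.empty hinv0
  have hC : pvGetColors t = pvDedupAcc [] t := rfl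
  have hlen : (pvDedupAcc [] t).length ≤ 256 := by
    rw [← hC, pvGetColors_length]; exact hpre
  simp only [rgba16_to_ci8, rgba16_to_ci8_alt, hfold, hC]
  have hnotgt : ¬ (pvDedupAcc [] t).length > 256 := by omega
  rw [if_neg hnotgt, if_neg hnotgt]
  have hpad : (if (pvDedupAcc [] t).length < 256 then
      (PySem.List.pyRange 0 (256 - ((pvDedupAcc [] t).length : Int)) 1).foldl
        (fun p _ => p ++ [(1 : Int)]) (pvDedupAcc [] t)
      else pvDedupAcc [] t)
      = pvDedupAcc [] t ++ List.replicate (256 - (pvDedupAcc [] t).length) 1 := by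
    by_cases h : (pvDedupAcc [] t).length < 256
    · rw [if_pos h, pvPadFold]
      congr 2
      rw [PySem.List.length_pyRange_one]
      omega
    · rw [if_neg h]
      have h0 : 256 - (pvDedupAcc [] t).length = 0 := by omega
      simp [h0]
  rw [hpad]
  have hmemC : ∀ p ∈ t, p ∈ pvDedupAcc [] t := by
    intro p hp
    rw [pvDedupAcc_mem]
    exact Or.inr hp
  have hci8 : t.foldl
      (fun acc pixel => if pixel ∈ pvDedupAcc [] t ++ List.replicate (256 - (pvDedupAcc [] t).length) 1 then
          acc ++ [(((PySem.List.index? (pvDedupAcc [] t ++ List.replicate (256 - (pvDedupAcc [] t).length) 1) pixel).getD 0 : Nat) : Int)]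
        else acc) []
      = t.map (fun p => (((pvDedupAcc [] t).idxOf p : Nat) : Int)) := by
    rw [pvFoldA _ _ _ (fun p hp => List.mem_append_left _ (hmemC p hp))]
    simp only [List.nil_append]
    apply List.map_congr_left
    intro p hp
    have hpc : p ∈ pvDedupAcc [] t := hmemC p hp
    rw [pvIndex?_eq_idxOf _ _ (List.mem_append_left _ hpc)]
    simp only [Option.getD_some]
    rw [pvIdxOf_prefix (pvDedupAcc [] t) _ p hpc]
  rw [hci8, pvMap_eq_mapIdx t []]
  simp
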